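-- pv_equiv track=rewrite | github.com/nikosreppaseb/code-analyzer | analyzer.py | _is_inside_function
-- ===== SOURCE A (Python) =====
-- from typing import Dict, List, Tuple, Any
--
-- def _is_inside_function(lines: List[str], line_index: int) -> bool:
--     """Check if a line is inside a function definition"""
--     for i in range(line_index - 1, -1, -1):
--         line = lines[i].strip()
--         if line.startswith('def '):
--             return True
--         if line and not line.startswith(' ') and not line.startswith('\t') and line != '':
--             if not line.startswith('#') and not line.startswith('def '):
--                 return False
--     return False
-- ===== SOURCE B (Python) =====
-- def _is_inside_function(lines, line_index):
--     """Check if a line is inside a function definition (forward state machine)."""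
--     inside = False
--     for i in range(0, line_index):
--         s = lines[i].strip()
--         if not s or s.startswith('#'):
--             continue
--         inside = s.startswith('def ')
--     return inside
-- ===== Notes on version B (the rewrite author's own statement) =====
-- stated objective: alternative
-- what changed: Replaces the backward early-exit scan (return at the first determining line before line_index) by a forward single pass that keeps an `inside` state updated at every non-blank non-comment line and returns the state after the loop.
import Mathlib
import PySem

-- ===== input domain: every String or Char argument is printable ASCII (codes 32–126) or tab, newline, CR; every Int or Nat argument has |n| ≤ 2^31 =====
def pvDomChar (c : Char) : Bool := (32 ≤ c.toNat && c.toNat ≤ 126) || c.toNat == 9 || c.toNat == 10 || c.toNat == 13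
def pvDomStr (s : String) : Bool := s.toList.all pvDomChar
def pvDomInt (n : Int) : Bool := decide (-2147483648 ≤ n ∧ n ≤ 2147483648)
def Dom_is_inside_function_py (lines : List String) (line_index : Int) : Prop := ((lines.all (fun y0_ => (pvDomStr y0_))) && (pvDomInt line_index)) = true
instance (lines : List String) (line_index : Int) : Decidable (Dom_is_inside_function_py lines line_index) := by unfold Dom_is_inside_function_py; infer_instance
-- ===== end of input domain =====

-- B replaces A's backward early-exit scan by a forward single pass keeping an `inside` state (alternative decomposition, same cost).


-- ===== PORT A =====
-- backward loop `for i in range(line_index-1, -1, -1)` with early returns, as structural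
-- recursion on the index list; `(pyGet? lines i).getD ""` — the `getD ""` is unreachable
-- under Pre_ (Python raises IndexError exactly where pyGet? is none).
def isifGoA (lines : List String) : List Int → Bool
  | [] => false
  | i :: rest =>
    let line := PySem.Str.strip ((PySem.List.pyGet? lines i).getD "")
    if PySem.Str.startswith line "def " then true
    else if line != "" && !PySem.Str.startswith line " " && !PySem.Str.startswith line "\t" && line != "" then
      if !PySem.Str.startswith line "#" && !PySem.Str.startswith line "def " then false
      else isifGoA lines rest
    else isifGoA lines rest

def is_inside_function_py (lines : List String) (line_index : Int) : Bool :=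
  isifGoA lines (PySem.List.pyRange (line_index - 1) (-1) (-1))

-- ===== PORT B =====
-- loop body of B: skip blank/comment lines, otherwise the state becomes `startswith s "def "`
def isifStep (lines : List String) (inside : Bool) (i : Int) : Bool :=
  let s := PySem.Str.strip ((PySem.List.pyGet? lines i).getD "")
  if s == "" || PySem.Str.startswith s "#" then inside
  else PySem.Str.startswith s "def "

def is_inside_function_py_alt (lines : List String) (line_index : Int) : Bool :=
  (PySem.List.pyRange 0 line_index 1).foldl (isifStep lines) false

-- ===== PRECONDITION & SPEC =====
-- Python A (and B) raises IndexError iff line_index > len(lines); exactly those inputs are excluded.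
def Pre_is_inside_function_py (lines : List String) (line_index : Int) : Prop :=
  line_index ≤ (lines.length : Int)
instance (lines : List String) (line_index : Int) : Decidable (Pre_is_inside_function_py lines line_index) := by
  unfold Pre_is_inside_function_py; infer_instance

def pvWitness_is_inside_function_py : List String × Int := (["def f():", "    pass"], 2)

def Spec_is_inside_function_py (lines : List String) (line_index : Int) (out : Bool) : Prop := out = is_inside_function_py_alt lines line_index
instance (lines : List String) (line_index : Int) (out : Bool) : Decidable (Spec_is_inside_function_py lines line_index out) := by unfold Spec_is_inside_function_py; infer_instance

-- ===== CLAIM (what is proved, stated in full; the proofs are below) =====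
def Claim_equal_is_inside_function_py : Prop := ∀ (lines : List String) (line_index : Int), Dom_is_inside_function_py lines line_index → Pre_is_inside_function_py lines line_index → Spec_is_inside_function_py lines line_index (is_inside_function_py lines line_index)

-- ===== LEMMAS AND PROOFS =====

-- the head of a `dropWhile` result falsifies the predicate
lemma dw_head (p : Char → Bool) (l : List Char) (c : Char) (t : List Char)
    (h : l.dropWhile p = c :: t) : p c = false := by
  have := List.head_dropWhile_not p (l := l) (by simp [h])
  simpa [h] using this

-- the head of a stripped character list is never whitespace
lemma strip_head_not_space (xs : List Char) (c : Char) (t : List Char)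
    (h : PySem.Chars.strip xs = c :: t) : PySem.Chars.isspace c = false := by
  have hpre : PySem.Chars.strip xs <+: PySem.Chars.lstrip xs := by
    unfold PySem.Chars.strip PySem.Chars.rstrip
    exact List.reverse_suffix.mp (by simpa using List.dropWhile_suffix (l := (PySem.Chars.lstrip xs).reverse) PySem.Chars.isspace)
  rw [h] at hpre
  obtain ⟨r, hr⟩ := hpre
  exact dw_head PySem.Chars.isspace xs c (t ++ r) (by simpa [PySem.Chars.lstrip] using hr.symm)

-- a stripped string never starts with a whitespace character
lemma startswith_strip_space (s : String) (c : Char) (hc : PySem.Chars.isspace c = true) :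
    PySem.Chars.startswith (PySem.Chars.strip s.toList) [c] = false := by
  cases hE : PySem.Chars.strip s.toList with
  | nil => simp [PySem.Chars.startswith]
  | cons d t =>
    have hd := strip_head_not_space _ _ _ hE
    simp only [PySem.Chars.startswith, List.isPrefixOf, Bool.and_eq_false_imp]
    intro hcd
    exfalso
    rw [show c = d from by simpa using hcd] at hc
    simp [hd] at hc

-- a line starting with "def " is nonempty and does not start with '#'
lemma def_not_hash (l : List Char) (h : PySem.Chars.startswith l ['d','e','f',' '] = true) :
    l ≠ [] ∧ PySem.Chars.startswith l ['#'] = false := by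
  rw [PySem.Chars.startswith_iff] at h
  obtain ⟨r, hr⟩ := h
  subst hr
  refine ⟨by simp, ?_⟩
  simp [PySem.Chars.startswith, List.isPrefixOf]

-- the backward early-exit scan over a reversed index list equals B's forward fold
lemma goA_reverse (lines : List String) (l : List Int) :
    isifGoA lines l.reverse = l.foldl (isifStep lines) false := by
  induction l using List.reverseRecOn with
  | nil => simp [isifGoA]
  | append_singleton l i ih =>
    rw [List.reverse_append, List.foldl_append]
    simp only [List.reverse_cons, List.reverse_nil, List.nil_append, List.singleton_append,
      List.foldl_cons, List.foldl_nil]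
    rw [isifGoA]
    set s := PySem.Str.strip ((PySem.List.pyGet? lines i).getD "") with hs
    have hsl : s.toList = PySem.Chars.strip ((PySem.List.pyGet? lines i).getD "").toList := by
      simp [hs]
    have hnsp : PySem.Chars.startswith s.toList [' '] = false := by
      rw [hsl]; exact startswith_strip_space _ ' ' (by decide)
    have hntab : PySem.Chars.startswith s.toList ['\t'] = false := by
      rw [hsl]; exact startswith_strip_space _ '\t' (by decide)
    by_cases hdef : PySem.Chars.startswith s.toList ['d','e','f',' '] = true
    · obtain ⟨hne, hnh⟩ := def_not_hash _ hdef
      have hne' : ¬ s = "" := fun h => hne (by simp [h])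
      simp [isifStep, ← hs, hdef, hnh, hne']
    · have hdefc : PySem.Chars.startswith s.toList ['d','e','f',' '] = false :=
        Bool.not_eq_true _ ▸ (by simpa using hdef)
      by_cases hempty : s = ""
      · simp [isifStep, ← hs, hempty, ih, PySem.Chars.startswith]
      · by_cases hhash : PySem.Chars.startswith s.toList ['#'] = true
        · simp [isifStep, ← hs, hdefc, hhash, ih, hempty, hnsp, hntab]
        · have hhashc : PySem.Chars.startswith s.toList ['#'] = false := by
            simpa using hhash
          simp [isifStep, ← hs, hdefc, hhashc, hempty, hnsp, hntab]

-- ===== VERDICT (by name: the statement is the Claim_ definition above) =====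
theorem is_inside_function_py_spec : Claim_equal_is_inside_function_py := by
  intro lines line_index _ _
  unfold Spec_is_inside_function_py is_inside_function_py is_inside_function_py_alt
  rw [PySem.List.pyRange_neg_one_eq_reverse]
  rw [show (-1 : Int) + 1 = 0 by ring, show line_index - 1 + 1 = line_index by ring]
  exact goA_reverse lines (PySem.List.pyRange 0 line_index 1)
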